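-- pv_equiv track=rewrite | github.com/relma2/rlcard | cs534/agents/rule_filter.py | _get_longest_meld_clusters
-- ===== SOURCE A (Python) =====
-- def _num_cards_in_meld_cluster(meld_cluster):
--     num = 0
--     for meld in meld_cluster:
--         num += len(meld)
--     return num
--
-- def _get_longest_meld_clusters(meld_clusters):
--     longest = 0
--     longest_meld_clusters = []
--     for meld_cluster in meld_clusters:
--         length = _num_cards_in_meld_cluster(meld_cluster)
--         if length == longest:
--             longest_meld_clusters.append(meld_cluster)
--         elif length > longest:
--             longest = length
--             longest_meld_clusters = [meld_cluster]
--     return longest_meld_clusters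
-- ===== SOURCE B (Python) =====
-- def _get_longest_meld_clusters(meld_clusters):
--     max_len = max((sum(len(meld) for meld in cluster) for cluster in meld_clusters), default=0)
--     return [cluster for cluster in meld_clusters
--             if sum(len(meld) for meld in cluster) == max_len]
-- ===== Notes on version B (the rewrite author's own statement) =====
-- stated objective: simpler
-- what changed: Replaced the inline running-max-with-reset accumulator by two passes: compute the maximum total card count (default 0) first, then collect all clusters attaining it with a comprehension.
import Mathlib
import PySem

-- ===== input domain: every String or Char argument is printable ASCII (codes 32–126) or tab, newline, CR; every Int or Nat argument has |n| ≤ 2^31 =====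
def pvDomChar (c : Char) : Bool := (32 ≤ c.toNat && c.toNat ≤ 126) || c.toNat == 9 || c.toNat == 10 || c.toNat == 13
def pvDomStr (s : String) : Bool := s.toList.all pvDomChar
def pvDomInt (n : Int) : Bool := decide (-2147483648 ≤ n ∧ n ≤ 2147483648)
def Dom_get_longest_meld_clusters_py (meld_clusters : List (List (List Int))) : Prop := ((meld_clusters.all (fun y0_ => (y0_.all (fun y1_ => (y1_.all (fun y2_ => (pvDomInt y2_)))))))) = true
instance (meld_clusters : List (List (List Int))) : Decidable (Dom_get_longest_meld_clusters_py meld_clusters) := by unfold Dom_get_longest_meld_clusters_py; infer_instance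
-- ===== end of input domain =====

-- B replaces A's running-max-with-reset accumulator by two plain passes (max, then filter); same O(n·m) cost, simpler.


-- ===== PORT A =====
-- port of _num_cards_in_meld_cluster: num = 0; for meld: num += len(meld)
def pvNumCards (meld_cluster : List (List Int)) : Int :=
  meld_cluster.foldl (fun num meld => num + (meld.length : Int)) 0

-- the loop body of A, state = (longest, longest_meld_clusters)
def pvStepA (st : Int × List (List (List Int))) (meld_cluster : List (List Int)) :
    Int × List (List (List Int)) :=
  let length := pvNumCards meld_cluster
  if length = st.1 then (st.1, st.2 ++ [meld_cluster])
  else if length > st.1 then (length, [meld_cluster])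
  else st

def get_longest_meld_clusters_py (meld_clusters : List (List (List Int))) : List (List (List Int)) :=
  (meld_clusters.foldl pvStepA (0, [])).2

-- ===== PORT B =====
-- sum(len(meld) for meld in cluster)
def pvSumLen (cluster : List (List Int)) : Int :=
  (cluster.map (fun meld => (meld.length : Int))).sum

def get_longest_meld_clusters_py_alt (meld_clusters : List (List (List Int))) : List (List (List Int)) :=
  let max_len := (meld_clusters.map pvSumLen).foldl max 0
  meld_clusters.filter (fun cluster => pvSumLen cluster = max_len)

-- ===== PRECONDITION & SPEC =====
def Spec_get_longest_meld_clusters_py (meld_clusters : List (List (List Int))) (out : List (List (List Int))) : Prop := out = get_longest_meld_clusters_py_alt meld_clusters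
instance (meld_clusters : List (List (List Int))) (out : List (List (List Int))) : Decidable (Spec_get_longest_meld_clusters_py meld_clusters out) := by unfold Spec_get_longest_meld_clusters_py; infer_instance

-- ===== CLAIM (what is proved, stated in full; the proofs are below) =====
def Claim_equal_get_longest_meld_clusters_py : Prop := ∀ (meld_clusters : List (List (List Int))), Dom_get_longest_meld_clusters_py meld_clusters → Spec_get_longest_meld_clusters_py meld_clusters (get_longest_meld_clusters_py meld_clusters)

-- ===== LEMMAS AND PROOFS =====

theorem pvNumCards_eq_sumLen (c : List (List Int)) : pvNumCards c = pvSumLen c := by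
  unfold pvNumCards pvSumLen
  induction c using List.reverseRecOn with
  | nil => simp
  | append_singleton xs x ih => simp [ih]

theorem foldr_max_shift (l : List Int) (a b : Int) :
    l.foldr max (max a b) = max a (l.foldr max b) := by
  induction l with
  | nil => rfl
  | cons x l ih => simp [List.foldr, ih, max_left_comm]

theorem foldl_max_eq_foldr (l : List Int) (a : Int) :
    l.foldl max a = l.foldr max a := by
  induction l generalizing a with
  | nil => rfl
  | cons x l ih =>
      simp only [List.foldl, List.foldr]
      rw [ih, max_comm a x, foldr_max_shift]

theorem le_foldr_max (l : List Int) (a : Int) : a ≤ l.foldr max a := by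
  induction l with
  | nil => exact le_refl a
  | cons x l ih => exact le_trans ih (le_max_right _ _)

-- characterisation of A's loop from an arbitrary state
theorem loopA_eq (xs : List (List (List Int))) (L : Int) (acc : List (List (List Int))) :
    (xs.foldl pvStepA (L, acc)).2 =
      (if (xs.map pvNumCards).foldr max L = L then acc else []) ++
        xs.filter (fun c => pvNumCards c = (xs.map pvNumCards).foldr max L) := by
  induction xs generalizing L acc with
  | nil => simp
  | cons c xs ih =>
      have hle : L ≤ (xs.map pvNumCards).foldr max L := le_foldr_max _ _
      simp only [List.foldl, List.map, List.foldr, List.filter]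
      by_cases h1 : pvNumCards c = L
      · -- append branch
        have hstep : pvStepA (L, acc) c = (L, acc ++ [c]) := by
          simp [pvStepA, h1]
        rw [hstep, ih]
        have hmax : max (pvNumCards c) ((xs.map pvNumCards).foldr max L)
            = (xs.map pvNumCards).foldr max L := by
          rw [h1]; exact max_eq_right hle
        simp only [hmax]
        by_cases h2 : (xs.map pvNumCards).foldr max L = L
        · have : pvNumCards c = (xs.map pvNumCards).foldr max L := by rw [h2, h1]
          simp [h2, this]
        · have : ¬ (pvNumCards c = (xs.map pvNumCards).foldr max L) := by
            rw [h1]; exact fun h => h2 h.symm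
          simp [h2, this]
      · by_cases h3 : pvNumCards c > L
        · -- reset branch
          have hstep : pvStepA (L, acc) c = (pvNumCards c, [c]) := by
            simp [pvStepA, h1, h3]
          rw [hstep, ih]
          have hM : (xs.map pvNumCards).foldr max (pvNumCards c)
              = max (pvNumCards c) ((xs.map pvNumCards).foldr max L) := by
            have : pvNumCards c = max (pvNumCards c) L := (max_eq_left (le_of_lt h3)).symm
            calc (xs.map pvNumCards).foldr max (pvNumCards c)
                = (xs.map pvNumCards).foldr max (max (pvNumCards c) L) := by rw [← this]
              _ = max (pvNumCards c) ((xs.map pvNumCards).foldr max L) := foldr_max_shift _ _ _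
          simp only [hM]
          have hML : ¬ (max (pvNumCards c) ((xs.map pvNumCards).foldr max L) = L) := by
            intro h
            have := le_max_left (pvNumCards c) ((xs.map pvNumCards).foldr max L)
            rw [h] at this
            exact absurd this (not_le.mpr h3)
          by_cases h4 : max (pvNumCards c) ((xs.map pvNumCards).foldr max L) = pvNumCards c
          · have hc : pvNumCards c = max (pvNumCards c) ((xs.map pvNumCards).foldr max L) :=
              h4.symm
            simp [h4, h1]
          · have hc : ¬ (pvNumCards c = max (pvNumCards c) ((xs.map pvNumCards).foldr max L)) :=
              fun h => h4 h.symm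
            rw [if_neg h4, if_neg hML]
            simp only [hc, List.nil_append]
            rfl
        · -- skip branch: pvNumCards c < L
          have hlt : pvNumCards c < L := lt_of_le_of_ne (not_lt.mp h3) h1
          have hstep : pvStepA (L, acc) c = (L, acc) := by
            simp [pvStepA, h1, h3]
          rw [hstep, ih]
          have hmax : max (pvNumCards c) ((xs.map pvNumCards).foldr max L)
              = (xs.map pvNumCards).foldr max L :=
            max_eq_right (le_trans (le_of_lt hlt) hle)
          simp only [hmax]
          have hc : ¬ (pvNumCards c = (xs.map pvNumCards).foldr max L) :=
            fun h => absurd (h ▸ (lt_of_lt_of_le hlt hle)) (lt_irrefl _)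
          simp [hc]

-- ===== VERDICT (by name: the statement is the Claim_ definition above) =====
theorem get_longest_meld_clusters_py_spec : Claim_equal_get_longest_meld_clusters_py := by
  intro meld_clusters _
  unfold Spec_get_longest_meld_clusters_py
  unfold get_longest_meld_clusters_py get_longest_meld_clusters_py_alt
  rw [loopA_eq]
  have hmap : meld_clusters.map pvSumLen = meld_clusters.map pvNumCards := by
    simp [pvNumCards_eq_sumLen]
  rw [hmap, foldl_max_eq_foldr]
  simp only [pvNumCards_eq_sumLen]
  simp
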